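-- pv_equiv track=rewrite | github.com/sofiakashubiak/lab3_dm | t3.py | bitStringA
-- ===== SOURCE A (Python) =====
-- def bitStringA(A, U):
--     result = []
--     for i in U:
--         if i in A:
--             i = 1
--         else:
--             i = 0
--         result.append(i)
--
--     return result
-- ===== SOURCE B (Python) =====
-- def bitStringA(A, U):
--     positions = {}
--     for j, v in enumerate(U):
--         positions.setdefault(v, []).append(j)
--     result = [0] * len(U)
--     for x in A:
--         for j in positions.get(x, []):
--             result[j] = 1
--     return result
-- ===== Notes on version B (the rewrite author's own statement) =====
-- stated objective: faster
-- what changed: Inverts the loops: instead of testing 'i in A' (a linear scan) for every element of U, B precomputes a dict mapping each value of U to all its positions, initialises an all-zero result, and for each element of A marks its recorded positions.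
import Mathlib
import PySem

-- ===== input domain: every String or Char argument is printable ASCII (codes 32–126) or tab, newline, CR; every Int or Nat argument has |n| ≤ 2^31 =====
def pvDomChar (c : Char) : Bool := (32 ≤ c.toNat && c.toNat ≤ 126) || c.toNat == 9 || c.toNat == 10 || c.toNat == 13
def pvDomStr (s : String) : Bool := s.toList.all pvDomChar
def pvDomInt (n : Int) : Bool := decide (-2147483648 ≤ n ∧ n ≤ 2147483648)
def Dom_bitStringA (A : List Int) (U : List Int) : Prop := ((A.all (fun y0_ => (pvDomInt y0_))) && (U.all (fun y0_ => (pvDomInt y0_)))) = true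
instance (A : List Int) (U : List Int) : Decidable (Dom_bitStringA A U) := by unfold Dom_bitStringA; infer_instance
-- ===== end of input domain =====

-- B inverts the loops: a precomputed value→positions index over U replaces the per-element 'i in A' scan (faster).


-- ===== PORT A =====
-- for i in U: append 1 if i in A else 0
def bitStringA (A : List Int) (U : List Int) : List Int :=
  U.foldl (fun result i => result ++ [if i ∈ A then (1 : Int) else 0]) []

-- ===== PORT B =====
-- positions: dict value -> list of its indices in U (setdefault(v, []).append(j));
-- result = [0]*len(U); for x in A: for j in positions.get(x, []): result[j] = 1
def bitStringA_alt (A : List Int) (U : List Int) : List Int :=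
  let positions : PySem.Dict Int (List Int) :=
    (PySem.List.enumerate U).foldl
      (fun d p => d.modify p.2 [] (fun l => l ++ [p.1])) PySem.Dict.empty
  let result := List.replicate U.length (0 : Int)
  A.foldl (fun r x => (positions.getD x []).foldl (fun r2 j => PySem.List.pySetD r2 j 1) r) result

-- ===== PRECONDITION & SPEC =====
def Spec_bitStringA (A : List Int) (U : List Int) (out : List Int) : Prop := out = bitStringA_alt A U
instance (A : List Int) (U : List Int) (out : List Int) : Decidable (Spec_bitStringA A U out) := by unfold Spec_bitStringA; infer_instance

-- ===== CLAIM (what is proved, stated in full; the proofs are below) =====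
def Claim_equal_bitStringA : Prop := ∀ (A : List Int) (U : List Int), Dom_bitStringA A U → Spec_bitStringA A U (bitStringA A U)

-- ===== LEMMAS AND PROOFS =====

-- A's loop builds the pointwise membership map.
theorem bitStringA_foldl_map (A U : List Int) (acc : List Int) :
    U.foldl (fun result i => result ++ [if i ∈ A then (1 : Int) else 0]) acc =
      acc ++ U.map (fun i => if i ∈ A then (1 : Int) else 0) := by
  induction U generalizing acc with
  | nil => simp
  | cons u U ih => simp [List.foldl_cons, ih]

-- Characterisation of the value→positions index built by B.
theorem buildIdx_getD (l : List (Int × Int)) (d : PySem.Dict Int (List Int)) (v : Int) :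
    (l.foldl (fun d p => d.modify p.2 [] (fun s => s ++ [p.1])) d).getD v [] =
      d.getD v [] ++ (l.filter (fun p => p.2 == v)).map (·.1) := by
  induction l generalizing d with
  | nil => simp
  | cons p l ih =>
    rw [List.foldl_cons, ih, List.filter_cons]
    by_cases h : p.2 = v
    · simp [h]
    · simp [h, PySem.Dict.getD_modify, Ne.symm h]

-- The inner marking loop preserves length.
theorem setFold_length (ps : List Int) (r : List Int) :
    (ps.foldl (fun r2 j => PySem.List.pySetD r2 j 1) r).length = r.length := by
  induction ps generalizing r with
  | nil => rfl
  | cons i ps ih => simp [List.foldl_cons, ih, PySem.List.length_pySetD]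

-- Elementwise effect of the inner marking loop (indices nonnegative).
theorem setFold_get (ps : List Int) (hpos : ∀ i ∈ ps, 0 ≤ i) (r : List Int) (j : Nat) :
    (ps.foldl (fun r2 j => PySem.List.pySetD r2 j 1) r)[j]? =
      if (j : Int) ∈ ps ∧ j < r.length then some 1 else r[j]? := by
  induction ps generalizing r with
  | nil => simp
  | cons i ps ih =>
    have hi : 0 ≤ i := hpos i (List.mem_cons_self ..)
    rw [List.foldl_cons,
        ih (fun a ha => hpos a (List.mem_cons_of_mem _ ha)) (PySem.List.pySetD r i 1),
        PySem.List.pySetD_of_nonneg r 1 hi, List.length_set, List.getElem?_set]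
    by_cases hji : (j : Int) = i
    · have hij : i.toNat = j := by omega
      by_cases hlen : j < r.length <;> by_cases hmem : (j : Int) ∈ ps <;>
        simp_all
    · have hne : ¬ (i.toNat = j) := by omega
      simp [hji, hne]

-- Elementwise effect of the outer loop over A.
theorem outerFold_get (A : List Int) (idxget : Int → List Int)
    (hpos : ∀ x, ∀ i ∈ idxget x, 0 ≤ i) (r : List Int) (j : Nat) :
    (A.foldl (fun r x => (idxget x).foldl (fun r2 j => PySem.List.pySetD r2 j 1) r) r)[j]? =
      if (∃ x ∈ A, (j : Int) ∈ idxget x) ∧ j < r.length then some 1 else r[j]? := by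
  induction A generalizing r with
  | nil => simp
  | cons a A ih =>
    rw [List.foldl_cons, ih, setFold_length, setFold_get _ (hpos a)]
    by_cases hlen : j < r.length <;>
      by_cases ha : (j : Int) ∈ idxget a <;>
      by_cases hA : ∃ x ∈ A, (j : Int) ∈ idxget x <;>
      simp_all

-- ===== VERDICT (by name: the statement is the Claim_ definition above) =====
theorem bitStringA_spec : Claim_equal_bitStringA := by
  intro A U _
  unfold Spec_bitStringA bitStringA bitStringA_alt
  rw [bitStringA_foldl_map]
  simp only [List.nil_append]
  have hidx : ∀ x, ((PySem.List.enumerate U).foldl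
      (fun d p => d.modify p.2 [] (fun l => l ++ [p.1])) PySem.Dict.empty).getD x [] =
      ((PySem.List.enumerate U).filter (fun p => p.2 == x)).map (·.1) := by
    intro x; rw [buildIdx_getD]; simp
  have hpos : ∀ x, ∀ i ∈ ((PySem.List.enumerate U).foldl
      (fun d p => d.modify p.2 [] (fun l => l ++ [p.1])) PySem.Dict.empty).getD x [], 0 ≤ i := by
    intro x i hi
    rw [hidx] at hi
    obtain ⟨p, hp, rfl⟩ := List.mem_map.1 hi
    obtain ⟨k, hk, rfl⟩ := (PySem.List.mem_enumerate_iff _ _ _).1 (List.mem_of_mem_filter hp)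
    simp
  have hmem : ∀ (j : Nat) (x : Int), ((j : Int) ∈ ((PySem.List.enumerate U).foldl
      (fun d p => d.modify p.2 [] (fun l => l ++ [p.1])) PySem.Dict.empty).getD x []) ↔
      ∃ h : j < U.length, U[j] = x := by
    intro j x
    rw [hidx]
    constructor
    · intro h
      obtain ⟨p, hp, hp1⟩ := List.mem_map.1 h
      obtain ⟨hpf, hpx⟩ := List.mem_filter.1 hp
      obtain ⟨k, hk, rfl⟩ := (PySem.List.mem_enumerate_iff _ _ _).1 hpf
      simp only at hp1 hpx
      have : k = j := by omega
      subst this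
      exact ⟨hk, by simpa using hpx⟩
    · rintro ⟨h, rfl⟩
      refine List.mem_map.2 ⟨((j : Int), U[j]), List.mem_filter.2 ⟨?_, by simp⟩, rfl⟩
      exact (PySem.List.mem_enumerate_iff _ _ _).2 ⟨j, h, by simp⟩
  apply List.ext_getElem?
  intro j
  rw [outerFold_get _ _ hpos, List.getElem?_map]
  simp only [List.length_replicate]
  by_cases hlen : j < U.length
  · have hU : U[j]? = some U[j] := List.getElem?_eq_getElem hlen
    by_cases hA : U[j] ∈ A
    · rw [if_pos ⟨⟨U[j], hA, (hmem j U[j]).2 ⟨hlen, rfl⟩⟩, hlen⟩, hU]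
      simp [hA]
    · rw [if_neg, List.getElem?_replicate, if_pos hlen, hU]
      · simp [hA]
      · rintro ⟨⟨x, hx, hjx⟩, -⟩
        obtain ⟨h, rfl⟩ := (hmem j x).1 hjx
        exact hA hx
  · rw [if_neg (by omega)]
    simp [hlen]
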